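-- pv_equiv track=rewrite | github.com/frankih9/Pat-Martino-Chromatic-Scale-Octavistics | Pat_Martino_Chromatic_Scale_Octavistics.py | stringFretComboGen
-- ===== SOURCE A (Python) =====
-- def stringFretComboGen(startNote, fretRange, fretboardAreaNotes, direction='ascend'):
--     '''
--     Parameters
--     ----------
--     startNote : int
--         The integer representation of the starting note.
--     fretboardAreaNotes : list of list of integers
--         The lists represent the strings of the defined fretboard.
--         The integers within each list are the integer
--         representation of the notes on that string for each
--         fret in the defined range of frets
--     direction: 'ascend' or whatever
--
--     Returns
--     -------
--     stringFretCombo : list of lists of tuples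
--         The lists represent the starting note and subsequent
--         chromatic notes. There are 13 lists since the ocatave is
--         included.  Within each list, are tuples of possible
--         (string, fret) combination in their integer representation.
--
--     '''
--     if direction == 'ascend':
--         patDir = 1
--     else:
--         patDir = -1
--
--     stringFretCombo=[]
--     currentNote = startNote
--     for _ in range(13) :
--         noteLst = []
--         for string in fretboardAreaNotes.keys():
--             notes = fretboardAreaNotes[string]
--             if currentNote in notes:
--                 fret = notes.index(currentNote) + fretRange[0]
--                 noteLst.append((string, fret))
--         stringFretCombo.append(noteLst)
--         currentNote = (currentNote + patDir) % 12
--     return stringFretCombo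
-- ===== SOURCE B (Python) =====
-- def stringFretComboGen(startNote, fretRange, fretboardAreaNotes, direction='ascend'):
--     if direction == 'ascend':
--         patDir = 1
--     else:
--         patDir = -1
--     # one pass over the fretboard: first occurrence index of each note per string
--     pairs = []
--     for string, notes in fretboardAreaNotes.items():
--         seen = set()
--         i = 0
--         for note in notes:
--             if note not in seen:
--                 seen.add(note)
--                 pairs.append((note, (string, i)))
--             i += 1
--     # index table: note -> list of (string, index) in string order
--     table = {}
--     for note, entry in pairs:
--         table.setdefault(note, []).append(entry)
--     out = []
--     currentNote = startNote
--     for _ in range(13):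
--         hits = table.get(currentNote, [])
--         out.append([(string, i + fretRange[0]) for string, i in hits])
--         currentNote = (currentNote + patDir) % 12
--     return out
-- ===== Notes on version B (the rewrite author's own statement) =====
-- stated objective: alternative
-- what changed: B builds, in one pass over the fretboard, an index table mapping each note to its (string, first-index) positions (a per-string seen-set mirrors list.index), so each of the 13 chromatic steps is a single dict lookup instead of a scan of every string with 'in' + '.index'; it trades A's repeated C-level scans for a precomputed table, same overall cost in practice.
import Mathlib
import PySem

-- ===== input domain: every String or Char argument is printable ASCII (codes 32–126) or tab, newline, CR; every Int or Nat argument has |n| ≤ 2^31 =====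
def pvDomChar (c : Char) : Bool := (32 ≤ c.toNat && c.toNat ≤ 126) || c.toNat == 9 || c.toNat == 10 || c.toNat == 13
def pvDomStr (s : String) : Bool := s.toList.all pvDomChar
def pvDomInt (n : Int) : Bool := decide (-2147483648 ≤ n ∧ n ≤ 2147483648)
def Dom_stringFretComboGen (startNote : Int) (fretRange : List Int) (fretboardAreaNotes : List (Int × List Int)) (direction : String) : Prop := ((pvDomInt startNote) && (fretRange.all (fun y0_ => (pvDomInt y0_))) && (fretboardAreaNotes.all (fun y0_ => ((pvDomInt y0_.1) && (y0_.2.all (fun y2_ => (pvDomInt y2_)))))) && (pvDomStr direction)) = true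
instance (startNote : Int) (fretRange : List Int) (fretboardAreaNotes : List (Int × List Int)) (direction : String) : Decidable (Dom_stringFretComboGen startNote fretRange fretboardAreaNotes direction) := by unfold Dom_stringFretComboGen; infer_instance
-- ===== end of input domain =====

-- B replaces A's per-chromatic-step scan of every string ('in' + '.index') by one
-- pass over the fretboard building a note→positions index table, then 13 lookups.

-- ===== PORT A =====
-- 'currentNote in notes' followed by 'notes.index(currentNote)' is ported as one
-- 'match PySem.List.index? notes currentNote' (some ↔ membership, same index).
-- fretRange[0] is read as pyGetD fretRange 0 0: exact whenever fretRange ≠ [] (Pre_).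
def stringFretComboGen (startNote : Int) (fretRange : List Int) (fretboardAreaNotes : List (Int × List Int)) (direction : String) : List (List (Int × Int)) :=
  let patDir : Int := if direction = "ascend" then 1 else -1
  ((List.range 13).foldl (fun acc _ =>
      let noteLst := fretboardAreaNotes.foldl (fun noteLst p =>
        match PySem.List.index? p.2 acc.2 with
        | some j => noteLst ++ [(p.1, (j : Int) + PySem.List.pyGetD fretRange 0 0)]
        | none => noteLst) []
      (acc.1 ++ [noteLst], PySem.Int.mod (acc.2 + patDir) 12))
    (([] : List (List (Int × Int))), startNote)).1

-- ===== PORT B =====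
-- the inner 'for note in notes: if note not in seen: …' loop of Source B
def pvFirsts (s : Int) : List Int → Int → PySem.Set Int → List (Int × (Int × Int))
  | [], _, _ => []
  | note :: rest, i, seen =>
    if note ∈ seen then pvFirsts s rest (i + 1) seen
    else (note, (s, i)) :: pvFirsts s rest (i + 1) (PySem.Set.add seen note)

-- fretRange[0] in the output comprehension is read as pyGetD fretRange 0 0:
-- exact whenever fretRange ≠ [] (Pre_; Source B evaluates it only when a hit exists, like A)
def stringFretComboGen_alt (startNote : Int) (fretRange : List Int) (fretboardAreaNotes : List (Int × List Int)) (direction : String) : List (List (Int × Int)) :=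
  let patDir : Int := if direction = "ascend" then 1 else -1
  let pairs := fretboardAreaNotes.flatMap (fun p => pvFirsts p.1 p.2 0 PySem.Set.empty)
  let table := pairs.foldl (fun d q => d.modify q.1 [] (· ++ [q.2])) PySem.Dict.empty
  ((List.range 13).foldl (fun acc _ =>
      (acc.1 ++ [(table.getD acc.2 []).map (fun q => (q.1, q.2 + PySem.List.pyGetD fretRange 0 0))],
        PySem.Int.mod (acc.2 + patDir) 12))
    (([] : List (List (Int × Int))), startNote)).1

-- ===== PRECONDITION & SPEC =====
-- Pre_ excludes exactly the inputs where both Pythons raise IndexError at fretRange[0]: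
-- fretRange empty while some note on the board lies in the 13-step chromatic orbit,
-- which is {startNote} ∪ {0,…,11} for either direction.
def Pre_stringFretComboGen (startNote : Int) (fretRange : List Int) (fretboardAreaNotes : List (Int × List Int)) (direction : String) : Prop :=
  fretRange ≠ [] ∨ ∀ p ∈ fretboardAreaNotes, ∀ m ∈ p.2, m ≠ startNote ∧ ¬ (0 ≤ m ∧ m ≤ 11)
instance (startNote : Int) (fretRange : List Int) (fretboardAreaNotes : List (Int × List Int)) (direction : String) : Decidable (Pre_stringFretComboGen startNote fretRange fretboardAreaNotes direction) := by unfold Pre_stringFretComboGen; infer_instance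
def pvWitness_stringFretComboGen : Int × List Int × (List (Int × List Int)) × String := (3, [1], [(0, [2, 3, 4]), (1, [7, 8])], "ascend")

def Spec_stringFretComboGen (startNote : Int) (fretRange : List Int) (fretboardAreaNotes : List (Int × List Int)) (direction : String) (out : List (List (Int × Int))) : Prop := out = stringFretComboGen_alt startNote fretRange fretboardAreaNotes direction
instance (startNote : Int) (fretRange : List Int) (fretboardAreaNotes : List (Int × List Int)) (direction : String) (out : List (List (Int × Int))) : Decidable (Spec_stringFretComboGen startNote fretRange fretboardAreaNotes direction out) := by unfold Spec_stringFretComboGen; infer_instance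

-- ===== CLAIM (what is proved, stated in full; the proofs are below) =====
def Claim_equal_stringFretComboGen : Prop := ∀ (startNote : Int) (fretRange : List Int) (fretboardAreaNotes : List (Int × List Int)) (direction : String), Dom_stringFretComboGen startNote fretRange fretboardAreaNotes direction → Pre_stringFretComboGen startNote fretRange fretboardAreaNotes direction → Spec_stringFretComboGen startNote fretRange fretboardAreaNotes direction (stringFretComboGen startNote fretRange fretboardAreaNotes direction)

-- ===== LEMMAS AND PROOFS =====

-- the first-occurrence list of one string, filtered at a note n, is exactly the
-- single (string, index + base) entry A's 'in'/'index' test produces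
theorem pvFirsts_filter (s n : Int) : ∀ (rest : List Int) (i : Int) (seen : PySem.Set Int),
    ((pvFirsts s rest i seen).filter (fun q => q.1 == n)).map (·.2) =
      (if n ∈ seen then [] else
        match PySem.List.index? rest n with
        | some j => [(s, (j : Int) + i)]
        | none => []) := by
  intro rest
  induction rest with
  | nil => intro i seen; simp [pvFirsts, PySem.List.index?]
  | cons note rest ih =>
    intro i seen
    by_cases hseen : note ∈ seen
    · rw [pvFirsts, if_pos hseen, ih]
      by_cases hn : n ∈ seen
      · simp [hn]
      · have hne : note ≠ n := fun h => hn (h ▸ hseen)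
        rw [if_neg hn, if_neg hn, PySem.List.index?_cons_of_ne rest hne]
        cases PySem.List.index? rest n with
        | none => simp
        | some j => simp; ring
    · rw [pvFirsts, if_neg hseen, List.filter_cons]
      by_cases hn : n = note
      · subst hn
        simp only [BEq.rfl, if_pos]
        rw [List.map_cons, ih]
        have : n ∈ PySem.Set.add seen n := by
          rw [PySem.Set.mem_add]; right; rfl
        rw [if_pos this, if_neg hseen, PySem.List.index?_cons_self]
        simp
      · have hbe : ((note, (s, i)).1 == n) = false := by
          simp; exact fun h => hn h.symm
        rw [hbe]
        simp only [if_neg (by simp : ¬ false = true)]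
        rw [ih]
        have hmem : (n ∈ PySem.Set.add seen note) ↔ (n ∈ seen) := by
          rw [PySem.Set.mem_add]
          constructor
          · rintro (h | h)
            · exact h
            · exact absurd h hn
          · exact Or.inl
        by_cases hns : n ∈ seen
        · rw [if_pos (hmem.mpr hns), if_pos hns]
        · rw [if_neg (fun h => hns (hmem.mp h)), if_neg hns,
              PySem.List.index?_cons_of_ne rest (fun h => hn h.symm)]
          cases PySem.List.index? rest n with
          | none => simp
          | some j => simp; ring

-- A's row for a note n equals B's table lookup at n
theorem pvRow_eq (base n : Int) (fb : List (Int × List Int)) :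
    fb.foldl (fun noteLst p =>
        match PySem.List.index? p.2 n with
        | some j => noteLst ++ [(p.1, (j : Int) + base)]
        | none => noteLst) [] =
    (((fb.flatMap (fun p => pvFirsts p.1 p.2 0 PySem.Set.empty)).foldl
        (fun d q => d.modify q.1 [] (· ++ [q.2])) PySem.Dict.empty).getD n []).map
      (fun q => (q.1, q.2 + base)) := by
  rw [PySem.Dict.getD_foldl_modify_append, PySem.Dict.getD_empty]
  have hstep : (fun (noteLst : List (Int × Int)) (p : Int × List Int) =>
      match PySem.List.index? p.2 n with
      | some j => noteLst ++ [(p.1, (j : Int) + base)]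
      | none => noteLst) =
      (fun noteLst p => noteLst ++
        (match PySem.List.index? p.2 n with
         | some j => [(p.1, (j : Int) + base)]
         | none => [])) := by
    funext noteLst p
    cases PySem.List.index? p.2 n with
    | some j => rfl
    | none => simp
  rw [hstep, PySem.List.foldl_append_eq_flatMap]
  simp only [List.nil_append]
  induction fb with
  | nil => simp
  | cons p fb ih =>
    rw [List.flatMap_cons, List.flatMap_cons, List.filter_append, List.map_append,
        List.map_append, ← ih]
    congr 1
    rw [pvFirsts_filter]
    rw [if_neg (by simp [PySem.Set.empty])]
    cases PySem.List.index? p.2 n with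
    | none => rfl
    | some j => simp

-- ===== VERDICT (by name: the statement is the Claim_ definition above) =====
theorem stringFretComboGen_spec : Claim_equal_stringFretComboGen := by
  intro startNote fretRange fb direction _ _
  unfold Spec_stringFretComboGen stringFretComboGen stringFretComboGen_alt
  simp only
  have hf : (fun (acc : List (List (Int × Int)) × Int) (_ : Nat) =>
      let noteLst := fb.foldl (fun noteLst p =>
        match PySem.List.index? p.2 acc.2 with
        | some j => noteLst ++ [(p.1, (j : Int) + PySem.List.pyGetD fretRange 0 0)]
        | none => noteLst) []
      (acc.1 ++ [noteLst], PySem.Int.mod (acc.2 + (if direction = "ascend" then (1 : Int) else -1)) 12)) =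
      (fun acc _ =>
      (acc.1 ++ [(((fb.flatMap (fun p => pvFirsts p.1 p.2 0 PySem.Set.empty)).foldl
          (fun d q => d.modify q.1 [] (· ++ [q.2])) PySem.Dict.empty).getD acc.2 []).map
            (fun q => (q.1, q.2 + PySem.List.pyGetD fretRange 0 0))],
        PySem.Int.mod (acc.2 + (if direction = "ascend" then (1 : Int) else -1)) 12)) := by
    funext acc x
    simp only
    rw [pvRow_eq]
  rw [hf]
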